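-- pv_equiv track=rewrite | github.com/summerfang/study | simpleboxpacking/python/simpleboxpacking/src/simpleboxpacking.py | get_integer_pairs_which_product_is_no_more_than_n
-- ===== SOURCE A (Python) =====
-- def get_integer_pairs_which_product_is_no_more_than_n(n):
--     """
--     Return a list of postive integer pair (x, y) which x * y >= n and (x + 1) * y or x * (y + 1) < n. n is another positive integer.
--         Parameters:
--             n (int): For example 5.
--         Returns:
--             combinations, for example, [(1,5), (5,1), (2,3), (3,2)].
--     """
--     if not isinstance(n, int) or n <= 0:
--         raise ValueError("n has to be positive integer.")
--
--     combinations = list()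
--
--     for i in range(1, n + 1):
--         y = 1
--
--         while i * y < n:
--             y = y + 1
--
--         combinations.append((i, y))
--
--     return combinations
-- ===== SOURCE B (Python) =====
-- def get_integer_pairs_which_product_is_no_more_than_n(n):
--     if not isinstance(n, int) or n <= 0:
--         raise ValueError("n has to be positive integer.")
--     return [(i, -(-n // i)) for i in range(1, n + 1)]
-- ===== Notes on version B (the rewrite author's own statement) =====
-- stated objective: faster
-- what changed: The inner while-loop that increments y until i*y >= n is replaced by the closed-form ceiling division y = -(-n // i), turning the O(n log n) nested loops into a single O(n) comprehension.
import Mathlib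
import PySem

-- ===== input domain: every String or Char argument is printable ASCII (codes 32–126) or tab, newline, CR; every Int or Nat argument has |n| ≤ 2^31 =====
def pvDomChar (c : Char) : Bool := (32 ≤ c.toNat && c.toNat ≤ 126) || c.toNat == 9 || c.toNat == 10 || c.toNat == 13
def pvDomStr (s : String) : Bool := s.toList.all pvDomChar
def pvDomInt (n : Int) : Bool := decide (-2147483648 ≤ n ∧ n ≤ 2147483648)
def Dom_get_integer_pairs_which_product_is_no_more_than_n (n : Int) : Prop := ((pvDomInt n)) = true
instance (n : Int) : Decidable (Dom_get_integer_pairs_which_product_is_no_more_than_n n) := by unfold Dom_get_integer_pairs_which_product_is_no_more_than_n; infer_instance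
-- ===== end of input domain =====

-- B replaces the inner incrementing while-loop by closed-form ceiling division (objective: faster).


-- ===== PORT A =====
-- the inner 'while i * y < n: y = y + 1'; the '1 ≤ i' conjunct only guards totality
-- (Python diverges when i ≤ 0 and i*y < n; in A, i always ranges over 1..n)
def pvWhileY (n i y : Int) : Int :=
  if h : i * y < n ∧ 1 ≤ i then pvWhileY n i (y + 1) else y
termination_by (n - i * y).toNat
decreasing_by
  have : i * (y + 1) = i * y + i := by ring
  omega

def get_integer_pairs_which_product_is_no_more_than_n (n : Int) : List (Int × Int) :=
  (PySem.List.pyRange 1 (n + 1) 1).foldl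
    (fun combinations i => combinations ++ [(i, pvWhileY n i 1)]) []

-- ===== PORT B =====
def get_integer_pairs_which_product_is_no_more_than_n_alt (n : Int) : List (Int × Int) :=
  (PySem.List.pyRange 1 (n + 1) 1).map (fun i => (i, -(PySem.Int.floordiv (-n) i)))

-- ===== PRECONDITION & SPEC =====
-- A raises ValueError for n ≤ 0 (and for non-int n, outside the type convention)
def Pre_get_integer_pairs_which_product_is_no_more_than_n (n : Int) : Prop := 1 ≤ n
instance (n : Int) : Decidable (Pre_get_integer_pairs_which_product_is_no_more_than_n n) := by unfold Pre_get_integer_pairs_which_product_is_no_more_than_n; infer_instance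
def pvWitness_get_integer_pairs_which_product_is_no_more_than_n : Int := 5

def Spec_get_integer_pairs_which_product_is_no_more_than_n (n : Int) (out : List (Int × Int)) : Prop := out = get_integer_pairs_which_product_is_no_more_than_n_alt n
instance (n : Int) (out : List (Int × Int)) : Decidable (Spec_get_integer_pairs_which_product_is_no_more_than_n n out) := by unfold Spec_get_integer_pairs_which_product_is_no_more_than_n; infer_instance

-- ===== CLAIM (what is proved, stated in full; the proofs are below) =====
def Claim_equal_get_integer_pairs_which_product_is_no_more_than_n : Prop := ∀ (n : Int), Dom_get_integer_pairs_which_product_is_no_more_than_n n → Pre_get_integer_pairs_which_product_is_no_more_than_n n → Spec_get_integer_pairs_which_product_is_no_more_than_n n (get_integer_pairs_which_product_is_no_more_than_n n)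

-- ===== LEMMAS AND PROOFS =====

-- the while-loop started at any y ≤ ceil(n/i) returns ceil(n/i)
theorem pvWhileY_eq_ceil (n i y : Int) (hi : 1 ≤ i)
    (hy : y ≤ -(PySem.Int.floordiv (-n) i)) :
    pvWhileY n i y = -(PySem.Int.floordiv (-n) i) := by
  set c := -(PySem.Int.floordiv (-n) i) with hc
  have hb : (c - 1) * i < n ∧ n ≤ c * i :=
    ((PySem.Int.neg_floordiv_neg_eq_iff_of_pos (a := n) (b := i) (q := c)
      (by omega)).mp hc.symm)
  rw [pvWhileY]
  by_cases hyc : y = c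
  · have : ¬ (i * y < n ∧ 1 ≤ i) := by
      subst hyc
      have : c * i = i * c := by ring
      omega
    simp [this]
    exact hyc
  · have hlt : y < c := by omega
    have h1 : i * y < n := by
      have h2 : i * y ≤ i * (c - 1) := by
        apply mul_le_mul_of_nonneg_left (by omega) (by omega)
      have h3 : i * (c - 1) = (c - 1) * i := by ring
      omega
    simp only [h1, hi, and_self, dite_true]
    exact pvWhileY_eq_ceil n i (y + 1) hi (by omega)
termination_by (-(PySem.Int.floordiv (-n) i) - y).toNat
decreasing_by omega

theorem pv_foldl_append_map {α β : Type} (f : α → β) (l : List α) (acc : List β) :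
    l.foldl (fun a i => a ++ [f i]) acc = acc ++ l.map f := by
  induction l generalizing acc with
  | nil => simp
  | cons x xs ih => simp [List.foldl, ih]

-- ===== VERDICT (by name: the statement is the Claim_ definition above) =====
theorem get_integer_pairs_which_product_is_no_more_than_n_spec : Claim_equal_get_integer_pairs_which_product_is_no_more_than_n := by
  intro n _ hn
  unfold Spec_get_integer_pairs_which_product_is_no_more_than_n
  unfold get_integer_pairs_which_product_is_no_more_than_n
  unfold get_integer_pairs_which_product_is_no_more_than_n_alt
  rw [pv_foldl_append_map]
  rw [List.nil_append]
  apply List.map_congr_left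
  intro i hi
  have hmem := (PySem.List.mem_pyRange_one.mp hi)
  have hi1 : 1 ≤ i := hmem.1
  have hceil : 1 ≤ -(PySem.Int.floordiv (-n) i) := by
    by_contra hcon
    set c := -(PySem.Int.floordiv (-n) i) with hc
    have hb2 : (c - 1) * i < n ∧ n ≤ c * i :=
      (PySem.Int.neg_floordiv_neg_eq_iff_of_pos (a := n) (b := i) (q := c) (by omega)).mp hc.symm
    have : c * i ≤ 0 * i := mul_le_mul_of_nonneg_right (by omega) (by omega)
    simp at this
    omega
  rw [pvWhileY_eq_ceil n i 1 hi1 hceil]
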